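-- pv_equiv track=rewrite | github.com/smkwray/qrawatch | src/ati_shadow_policy/investor_allotments.py | _find_security_column
-- ===== SOURCE A (Python) =====
-- def _find_security_column(headers: list[str]) -> str | None:
--     preferred = [
--         "security term",
--         "security type",
--     ]
--     for token in preferred:
--         for header in headers:
--             if token in header:
--                 return header
--     for header in headers:
--         if "security" in header and ("term" in header or "type" in header):
--             return header
--     return None
-- ===== SOURCE B (Python) =====
-- def _find_security_column(headers: list[str]) -> str | None:
--     best = None  # (rank, header): rank 1 = "security type", rank 2 = generic fallback
--     for header in headers:
--         if "security term" in header: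
--             return header
--         if "security type" in header:
--             rank = 1
--         elif "security" in header and ("term" in header or "type" in header):
--             rank = 2
--         else:
--             continue
--         if best is None or rank < best[0]:
--             best = (rank, header)
--     return best[1] if best is not None else None
-- ===== Notes on version B (the rewrite author's own statement) =====
-- stated objective: alternative
-- what changed: Replaces A's three full scans of the header list by a single pass that early-returns on a 'security term' match and otherwise tracks the lowest-rank earliest header ('security type' before generic security+term/type fallback).
import Mathlib
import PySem

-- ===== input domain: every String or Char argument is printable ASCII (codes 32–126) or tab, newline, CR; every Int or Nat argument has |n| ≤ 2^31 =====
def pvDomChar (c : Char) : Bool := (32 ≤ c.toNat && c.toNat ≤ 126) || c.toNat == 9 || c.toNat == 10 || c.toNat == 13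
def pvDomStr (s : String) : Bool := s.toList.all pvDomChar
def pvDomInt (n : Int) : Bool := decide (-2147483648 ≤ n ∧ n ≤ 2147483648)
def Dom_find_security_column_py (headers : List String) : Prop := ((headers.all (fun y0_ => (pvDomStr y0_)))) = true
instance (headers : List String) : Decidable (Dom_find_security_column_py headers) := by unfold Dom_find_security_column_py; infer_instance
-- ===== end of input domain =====

-- B replaces A's three full scans by one pass tracking the best-ranked earliest header (alternative decomposition, same exact result).

-- ===== PORT A =====
-- inner 'for header in headers: if token in header: return header'
def pvLoopTok (tok : String) : List String → Option String
  | [] => none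
  | h :: t => if PySem.Str.isIn tok h then some h else pvLoopTok tok t

-- outer 'for token in preferred'
def pvPrefLoop (headers : List String) : List String → Option String
  | [] => none
  | tok :: toks =>
    match pvLoopTok tok headers with
    | some h => some h
    | none => pvPrefLoop headers toks

-- fallback 'for header in headers: if "security" in header and (...)'
def pvFallLoop : List String → Option String
  | [] => none
  | h :: t =>
    if PySem.Str.isIn "security" h && (PySem.Str.isIn "term" h || PySem.Str.isIn "type" h)
    then some h else pvFallLoop t

def find_security_column_py (headers : List String) : Option String :=
  match pvPrefLoop headers ["security term", "security type"] with
  | some h => some h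
  | none => pvFallLoop headers

-- ===== PORT B =====
-- rank of a header once the early-return 'security term' test failed (B's if/elif chain)
def pvRank? (h : String) : Option Nat :=
  if PySem.Str.isIn "security type" h then some 1
  else if PySem.Str.isIn "security" h && (PySem.Str.isIn "term" h || PySem.Str.isIn "type" h) then some 2
  else none

-- 'if best is None or rank < best[0]: best = (rank, header)'
def pvBetter (best : Option (Nat × String)) (h : String) : Option (Nat × String) :=
  match pvRank? h with
  | none => best
  | some r =>
    match best with
    | none => some (r, h)
    | some (br, bh) => if r < br then some (r, h) else some (br, bh)

-- the single pass with early return on a rank-0 header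
def pvBLoop : List String → Option (Nat × String) → Option String
  | [], best => best.map Prod.snd
  | h :: t, best =>
    if PySem.Str.isIn "security term" h then some h
    else pvBLoop t (pvBetter best h)

def find_security_column_py_alt (headers : List String) : Option String :=
  pvBLoop headers none

-- ===== PRECONDITION & SPEC =====
def Spec_find_security_column_py (headers : List String) (out : Option String) : Prop := out = find_security_column_py_alt headers
instance (headers : List String) (out : Option String) : Decidable (Spec_find_security_column_py headers out) := by unfold Spec_find_security_column_py; infer_instance

-- ===== CLAIM (what is proved, stated in full; the proofs are below) =====
def Claim_equal_find_security_column_py : Prop := ∀ (headers : List String), Dom_find_security_column_py headers → Spec_find_security_column_py headers (find_security_column_py headers)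

-- ===== LEMMAS AND PROOFS =====

def pvP0 (h : String) : Bool := PySem.Str.isIn "security term" h
def pvP1 (h : String) : Bool := PySem.Str.isIn "security type" h
def pvP2 (h : String) : Bool := PySem.Str.isIn "security" h && (PySem.Str.isIn "term" h || PySem.Str.isIn "type" h)

theorem pvLoopTok_eq_find? (tok : String) (l : List String) :
    pvLoopTok tok l = l.find? (fun h => PySem.Str.isIn tok h) := by
  induction l with
  | nil => rfl
  | cons h t ih => cases hc : PySem.Str.isIn tok h <;> simp_all [pvLoopTok, List.find?]

theorem pvFallLoop_eq_find? (l : List String) : pvFallLoop l = l.find? pvP2 := by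
  induction l with
  | nil => rfl
  | cons h t ih =>
    cases hc : pvP2 h
    all_goals
      have hc' := hc
      unfold pvP2 at hc'
      simp_all [pvFallLoop, List.find?]

theorem pvBetter_none_1 (h : String) (h1 : pvP1 h = true) : pvBetter none h = some (1, h) := by
  unfold pvP1 at h1; simp at h1; simp [pvBetter, pvRank?, h1]

theorem pvBetter_none_2 (h : String) (h1 : pvP1 h = false) (h2 : pvP2 h = true) :
    pvBetter none h = some (2, h) := by
  unfold pvP1 at h1; unfold pvP2 at h2; simp at h1 h2; simp [pvBetter, pvRank?, h1, h2]

theorem pvBetter_none_skip (h : String) (h1 : pvP1 h = false) (h2 : pvP2 h = false) :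
    pvBetter none h = none := by
  unfold pvP1 at h1; unfold pvP2 at h2; simp at h1 h2
  unfold pvBetter pvRank?
  rw [if_neg (by simp [h1]), if_neg (by simp; exact h2)]

theorem pvBetter_one (b h : String) : pvBetter (some (1, b)) h = some (1, b) := by
  unfold pvBetter pvRank?
  cases h1 : PySem.Str.isIn "security type" h <;>
    cases h2 : (PySem.Str.isIn "security" h && (PySem.Str.isIn "term" h || PySem.Str.isIn "type" h)) <;>
    simp_all

theorem pvBetter_two_not1 (b h : String) (h1 : pvP1 h = false) :
    pvBetter (some (2, b)) h = some (2, b) := by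
  unfold pvP1 at h1; unfold pvBetter pvRank?
  simp at h1
  cases h2 : (PySem.Str.isIn "security" h && (PySem.Str.isIn "term" h || PySem.Str.isIn "type" h)) <;>
    simp_all

theorem pvBetter_two_1 (b h : String) (h1 : pvP1 h = true) :
    pvBetter (some (2, b)) h = some (1, h) := by
  unfold pvP1 at h1; simp at h1; simp [pvBetter, pvRank?, h1]

-- a rank-1 best is never replaced
theorem pvFold_keep1 (l : List String) (b : String) :
    l.foldl pvBetter (some (1, b)) = some (1, b) := by
  induction l with
  | nil => rfl
  | cons h t ih => simp [List.foldl, pvBetter_one, ih]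

-- with no rank-1 header in l, a rank-2 best is never replaced
theorem pvFold_keep2 (l : List String) (b : String) (hl : ∀ h ∈ l, pvP1 h = false) :
    l.foldl pvBetter (some (2, b)) = some (2, b) := by
  induction l with
  | nil => rfl
  | cons h t ih =>
    rw [List.foldl, pvBetter_two_not1 _ _ (hl h (by simp))]
    exact ih (fun x hx => hl x (by simp [hx]))

-- a rank-2 best is upgraded to the first rank-1 header of l
theorem pvFold_up (l : List String) (b h' : String) (hf : l.find? pvP1 = some h') :
    l.foldl pvBetter (some (2, b)) = some (1, h') := by
  induction l generalizing b with
  | nil => simp at hf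
  | cons h t ih =>
    cases h1 : pvP1 h with
    | true =>
      have hh : h' = h := by simp [List.find?, h1] at hf; exact hf.symm
      rw [List.foldl, pvBetter_two_1 _ _ h1, hh, pvFold_keep1]
    | false =>
      rw [List.find?, h1] at hf
      rw [List.foldl, pvBetter_two_not1 _ _ h1]
      exact ih b hf

-- main characterisation of the fold from an empty best
theorem pvFold_main (l : List String) :
    (l.foldl pvBetter none).map Prod.snd =
      match l.find? pvP1 with
      | some h => some h
      | none => l.find? pvP2 := by
  induction l with
  | nil => rfl
  | cons h t ih =>
    cases h1 : pvP1 h with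
    | true =>
      rw [List.foldl, pvBetter_none_1 _ h1, pvFold_keep1]
      simp [List.find?, h1]
    | false =>
      cases h2 : pvP2 h with
      | true =>
        rw [List.foldl, pvBetter_none_2 _ h1 h2]
        cases hf : t.find? pvP1 with
        | some h' =>
          rw [pvFold_up t h h' hf]
          simp [List.find?, h1, hf]
        | none =>
          rw [pvFold_keep2 t h (by
            intro x hx
            have := List.find?_eq_none.mp hf x hx
            simpa using this)]
          simp [List.find?, h1, h2, hf]
      | false =>
        rw [List.foldl, pvBetter_none_skip _ h1 h2]
        simp [List.find?, h1, h2, ih]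

-- characterisation of B's loop
theorem pvBLoop_eq (l : List String) (best : Option (Nat × String)) :
    pvBLoop l best =
      match l.find? pvP0 with
      | some h => some h
      | none => (l.foldl pvBetter best).map Prod.snd := by
  induction l generalizing best with
  | nil => rfl
  | cons h t ih =>
    cases h0 : pvP0 h
    all_goals
      have h0' := h0
      unfold pvP0 at h0'
      simp_all [pvBLoop, List.find?, List.foldl]

-- ===== VERDICT (by name: the statement is the Claim_ definition above) =====
theorem find_security_column_py_spec : Claim_equal_find_security_column_py := by
  intro headers _
  unfold Spec_find_security_column_py find_security_column_py find_security_column_py_alt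
  rw [pvBLoop_eq, pvFold_main]
  simp only [pvPrefLoop, pvLoopTok_eq_find?, pvFallLoop_eq_find?]
  rw [show (fun h => PySem.Str.isIn "security term" h) = pvP0 from rfl,
      show (fun h => PySem.Str.isIn "security type" h) = pvP1 from rfl]
  cases List.find? pvP0 headers <;> cases List.find? pvP1 headers <;> rfl
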